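-- pv_equiv track=rewrite | github.com/mikelongxc/ArtificialIntelligence | P4/mineshafted.py | check_mines
-- ===== SOURCE A (Python) =====
-- from typing import Callable, Generator, List, Tuple, Set
--
-- def check_mines(domain: List[List[int]]) -> List[int]:
--     """consistent_mines = False
--     for i in range(len(domain) - 1):
--         for j in range(len(domain[i])):
--             if domain[i][j] != domain[i + 1][j]:
--                 consistent_mines = False
--             else:
--                 consistent_mines = True"""
--
--     # for each number
--     mine_list = []
--     mine = True
--     for i in range(len(domain[0])):
--         for j in range(len(domain) - 1):
--             if domain[j][i] != domain[j + 1][i]: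
--                 mine = False
--         if mine == True:
--             mine_list.append(domain[0][i])
--         mine = True
--
--     return mine_list
-- ===== SOURCE B (Python) =====
-- def check_mines(domain):
--     # Row-major candidate pruning: keep the set of still-consistent column
--     # indices, shrinking it on each row; correct because a column is constant
--     # iff every row agrees with row 0 at that index.
--     first = domain[0]
--     candidates = list(range(len(first)))
--     for row in domain[1:]:
--         candidates = [i for i in candidates if row[i] == first[i]]
--     return [first[i] for i in candidates]
-- ===== Notes on version B (the rewrite author's own statement) =====
-- stated objective: faster
-- what changed: Replaced A's column-major nested loop with a running flag by a row-major single pass that maintains a shrinking list of still-consistent column indices (candidate pruning against row 0); dropped columns are never compared again.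
import Mathlib
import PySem

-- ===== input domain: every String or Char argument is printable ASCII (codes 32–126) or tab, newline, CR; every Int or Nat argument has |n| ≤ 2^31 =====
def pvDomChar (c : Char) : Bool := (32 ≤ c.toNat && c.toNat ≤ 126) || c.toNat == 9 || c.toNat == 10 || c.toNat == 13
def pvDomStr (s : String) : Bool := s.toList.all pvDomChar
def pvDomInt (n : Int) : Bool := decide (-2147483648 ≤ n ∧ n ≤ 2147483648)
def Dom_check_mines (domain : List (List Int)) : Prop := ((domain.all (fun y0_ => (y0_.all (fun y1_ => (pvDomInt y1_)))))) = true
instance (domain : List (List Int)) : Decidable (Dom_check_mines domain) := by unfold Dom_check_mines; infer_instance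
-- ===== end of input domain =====

-- B replaces A's column-major nested loop + flag by a row-major pass pruning a shrinking list of still-consistent column indices; measured constant-factor faster (pruned columns skip later comparisons).
-- ===== PORT A =====
def check_mines (domain : List (List Int)) : List Int :=
  ((PySem.List.pyRange 0 ((domain.headD []).length : Int) 1).foldl
    (fun (st : List Int × Bool) i =>
      let mine := (PySem.List.pyRange 0 ((domain.length : Int) - 1) 1).foldl
        (fun mine j =>
          if PySem.List.pyGetD (PySem.List.pyGetD domain j []) i 0 ≠
             PySem.List.pyGetD (PySem.List.pyGetD domain (j + 1) []) i 0
          then false else mine) st.2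
      (if mine = true
       then st.1 ++ [PySem.List.pyGetD (PySem.List.pyGetD domain 0 []) i 0]
       else st.1, true))
    ([], true)).1

-- ===== PORT B =====
-- row-major candidate pruning: candidates = [i for i in candidates if row[i] == first[i]]
-- (indices are nonnegative and in range under Pre_, so Nat indices with getD are exact)
def check_mines_alt (domain : List (List Int)) : List Int :=
  let first := domain.headD []
  (((domain.drop 1).foldl
      (fun (cands : List Nat) row =>
        cands.filter (fun i => row.getD i 0 == first.getD i 0))
      (List.range first.length)).map (fun i => first.getD i 0))

-- ===== PRECONDITION & SPEC =====
-- Pre_ excludes exactly the inputs on which A raises IndexError: the empty grid, and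
-- multi-row grids in which some row is shorter than row 0.
def Pre_check_mines (domain : List (List Int)) : Prop :=
  domain ≠ [] ∧ (domain.length ≤ 1 ∨ ∀ row ∈ domain, (domain.headD []).length ≤ row.length)
instance (domain : List (List Int)) : Decidable (Pre_check_mines domain) := by
  unfold Pre_check_mines; infer_instance
def pvWitness_check_mines : List (List Int) := [[1, 2], [1, 3]]

def Spec_check_mines (domain : List (List Int)) (out : List Int) : Prop := out = check_mines_alt domain
instance (domain : List (List Int)) (out : List Int) : Decidable (Spec_check_mines domain out) := by unfold Spec_check_mines; infer_instance

-- ===== CLAIM (what is proved, stated in full; the proofs are below) =====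
def Claim_equal_check_mines : Prop := ∀ (domain : List (List Int)), Dom_check_mines domain → Pre_check_mines domain → Spec_check_mines domain (check_mines domain)

-- ===== LEMMAS AND PROOFS =====

-- A's inner flag loop, started at m, computes m && "no adjacent mismatch"
lemma flag_foldl {α : Type} (q : α → Prop) [DecidablePred q] :
    ∀ (js : List α) (m : Bool),
      js.foldl (fun m j => if q j then false else m) m
        = (m && js.all (fun j => !decide (q j))) := by
  intro js
  induction js with
  | nil => simp
  | cons j js ih =>
      intro m
      simp only [List.foldl_cons]
      by_cases h : q j
      · rw [if_pos h, ih]; simp [h]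
      · rw [if_neg h, ih]; simp [h]

-- A's outer accumulation loop (flag re-set to True each iteration) is a filterMap
lemma outer_foldl (g : Int → Bool) (v : Int → Int) :
    ∀ (ks : List Int) (acc : List Int),
      (ks.foldl (fun (st : List Int × Bool) i =>
        (if (st.2 && g i) = true then st.1 ++ [v i] else st.1, true)) (acc, true))
      = (acc ++ ks.filterMap (fun i => if g i then some (v i) else none), true) := by
  intro ks
  induction ks with
  | nil => simp
  | cons k ks ih =>
      intro acc
      simp only [List.foldl_cons]
      by_cases h : g k = true
      · simp only [Bool.true_and, h]
        rw [ih]; simp [h]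
      · simp only [Bool.true_and]
        rw [if_neg (by simp [h]), ih]
        simp [h]

-- all adjacent pairs equal iff all elements equal the head
lemma chain_iff : ∀ (xs : List Int) (x : Int),
    (∀ t : Nat, t + 1 < (x :: xs).length → (x :: xs).getD t 0 = (x :: xs).getD (t+1) 0)
      ↔ (∀ y ∈ xs, y = x) := by
  intro xs
  induction xs with
  | nil => simp
  | cons y ys ih =>
      intro x
      constructor
      · intro h z hz
        have hxy : x = y := h 0 (by simp)
        have hch : ∀ t : Nat, t + 1 < (y :: ys).length →
            (y :: ys).getD t 0 = (y :: ys).getD (t+1) 0 := by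
          intro t ht
          have := h (t+1) (by simp at ht ⊢; omega)
          simpa using this
        rcases List.mem_cons.mp hz with h1 | h1
        · omega
        · rw [hxy]; exact (ih y).mp hch z h1
      · intro h t ht
        have hxy : y = x := h y (by simp)
        have hall : ∀ z ∈ ys, z = y := by
          intro z hz; rw [hxy]; exact h z (by simp [hz])
        have hch := (ih y).mpr hall
        match t with
        | 0 => simpa using hxy.symm
        | Nat.succ t =>
            have := hch t (by simp at ht ⊢; omega)
            simpa using this

-- B's row pass: folding filters over the rows filters once by the conjunction
lemma foldl_filter (p : List Int → Nat → Bool) :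
    ∀ (rs : List (List Int)) (c : List Nat),
      rs.foldl (fun c row => c.filter (p row)) c
        = c.filter (fun i => rs.all (fun row => p row i)) := by
  intro rs
  induction rs with
  | nil => simp
  | cons r rs ih =>
      intro c
      simp only [List.foldl_cons]
      rw [ih, List.filter_filter]
      apply List.filter_congr
      intro i _
      exact Bool.and_comm _ _

-- a filterMap of an if-some-none is a filter-then-map
lemma filterMap_if {α : Type} (p : α → Prop) [DecidablePred p] (v : α → Int) :
    ∀ (l : List α),
      l.filterMap (fun k => if p k then some (v k) else none)
        = (l.filter (fun k => decide (p k))).map v := by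
  intro l
  induction l with
  | nil => rfl
  | cons a l ih =>
      by_cases h : p a <;> simp [h, ih]

-- both programs compute the same filter-then-map over the column indices
theorem both_eq_mid (r0 : List Int) (rs : List (List Int)) :
    check_mines (r0 :: rs) = check_mines_alt (r0 :: rs) := by
  set domain := r0 :: rs with hdom
  have hA : check_mines domain
      = (List.range r0.length).filterMap
          (fun k => if (∀ row ∈ rs, row.getD k 0 = r0.getD k 0)
                    then some (r0.getD k 0) else none) := by
    unfold check_mines
    have hbody : (fun (st : List Int × Bool) (i : Int) =>
        ((if ((PySem.List.pyRange 0 ((domain.length : Int) - 1) 1).foldl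
            (fun mine j =>
              if PySem.List.pyGetD (PySem.List.pyGetD domain j []) i 0 ≠
                 PySem.List.pyGetD (PySem.List.pyGetD domain (j + 1) []) i 0
              then false else mine) st.2) = true
         then st.1 ++ [PySem.List.pyGetD (PySem.List.pyGetD domain 0 []) i 0]
         else st.1), true))
      = (fun (st : List Int × Bool) (i : Int) =>
        ((if (st.2 && ((PySem.List.pyRange 0 ((domain.length : Int) - 1) 1).all
            (fun j => !decide (PySem.List.pyGetD (PySem.List.pyGetD domain j []) i 0 ≠
                 PySem.List.pyGetD (PySem.List.pyGetD domain (j + 1) []) i 0)))) = true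
         then st.1 ++ [PySem.List.pyGetD (PySem.List.pyGetD domain 0 []) i 0]
         else st.1), true)) := by
      funext st i
      rw [flag_foldl]
    rw [hbody, outer_foldl]
    simp only [List.nil_append]
    rw [PySem.List.pyRange_zero_nat, List.filterMap_map]
    apply List.filterMap_congr
    intro k _
    simp only [Function.comp]
    have hval : PySem.List.pyGetD (PySem.List.pyGetD domain 0 []) (k : Int) 0
        = r0.getD k 0 := by
      simp [hdom]
    rw [hval]
    refine if_congr ?_ rfl rfl
    rw [List.all_eq_true]
    have hstep : ∀ j : Int, j ∈ PySem.List.pyRange 0 ((domain.length : Int) - 1) 1 →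
        ((!decide (PySem.List.pyGetD (PySem.List.pyGetD domain j []) (k : Int) 0 ≠
            PySem.List.pyGetD (PySem.List.pyGetD domain (j + 1) []) (k : Int) 0)) = true
        ↔ ((domain.map (fun row => row.getD k 0)).getD j.toNat 0
            = (domain.map (fun row => row.getD k 0)).getD (j.toNat + 1) 0)) := by
      intro j hj
      rw [PySem.List.mem_pyRange_one] at hj
      have h0 : (0:Int) ≤ j := hj.1
      rw [PySem.List.pyGetD_of_nonneg domain [] h0,
          PySem.List.pyGetD_of_nonneg domain [] (by omega : (0:Int) ≤ j + 1)]
      have ht1 : (j + 1).toNat = j.toNat + 1 := by omega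
      rw [ht1]
      have hm : ∀ t : Nat, (domain.map (fun row => row.getD k 0)).getD t 0
          = (domain.getD t []).getD k 0 := by
        intro t
        by_cases ht : t < domain.length
        · simp [List.getD_eq_getElem?_getD, List.getElem?_map,
            List.getElem?_eq_getElem ht]
        · simp [List.getD_eq_getElem?_getD, List.getElem?_map,
            List.getElem?_eq_none (by omega : domain.length ≤ t)]
      rw [hm j.toNat, hm (j.toNat + 1)]
      simp
    constructor
    · intro h
      have hch : ∀ t : Nat, t + 1 < (domain.map (fun row => row.getD k 0)).length →
          (domain.map (fun row => row.getD k 0)).getD t 0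
            = (domain.map (fun row => row.getD k 0)).getD (t+1) 0 := by
        intro t ht
        simp only [List.length_map] at ht
        have hmem : (t : Int) ∈ PySem.List.pyRange 0 ((domain.length : Int) - 1) 1 := by
          rw [PySem.List.mem_pyRange_one]; omega
        have := (hstep t hmem).mp (h _ hmem)
        simpa using this
      have := (chain_iff (rs.map (fun row => row.getD k 0)) (r0.getD k 0)).mp (by
        intro t ht
        exact hch t (by simpa [hdom] using ht))
      simpa [List.forall_mem_map] using this
    · intro h j hj
      rw [hstep j hj]
      have hch := (chain_iff (rs.map (fun row => row.getD k 0)) (r0.getD k 0)).mpr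
        (by simpa [List.forall_mem_map] using h)
      rw [PySem.List.mem_pyRange_one] at hj
      have hLd : domain.length = rs.length + 1 := by rw [hdom]; rfl
      have := hch j.toNat (by simp; omega)
      simpa [hdom] using this
  have hB : check_mines_alt domain
      = (List.range r0.length).filterMap
          (fun k => if (∀ row ∈ rs, row.getD k 0 = r0.getD k 0)
                    then some (r0.getD k 0) else none) := by
    unfold check_mines_alt
    simp only [hdom, List.headD_cons, List.drop_one, List.tail_cons]
    rw [foldl_filter,
      filterMap_if (fun k : Nat => ∀ row ∈ rs, row.getD k 0 = r0.getD k 0)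
        (fun k => r0.getD k 0)]
    congr 1
    apply List.filter_congr
    intro i _
    rw [Bool.eq_iff_iff, List.all_eq_true, decide_eq_true_iff]
    simp
  rw [hA, hB]

-- ===== VERDICT (by name: the statement is the Claim_ definition above) =====
theorem check_mines_spec : Claim_equal_check_mines := by
  intro domain _ hpre
  unfold Spec_check_mines
  obtain ⟨hne, -⟩ := hpre
  cases domain with
  | nil => exact absurd rfl hne
  | cons r0 rs => exact both_eq_mid r0 rs
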